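-- pv_equiv track=rewrite | github.com/Tusenka/hackerrank | seq_numbers.py | _count
-- ===== SOURCE A (Python) =====
-- def _count(a: list, l: int):
--     if len(a)==1:
--         return 1
--     a.sort()
--     i=0
--     _counter=0
--     while i<len(a):
--         x=a[i]
--         i+=1
--         _counter+=1
--         while i<len(a) and a[i] <= x+2*l:
--             i+=1
--     return _counter
-- ===== SOURCE B (Python) =====
-- def _count(a: list, l: int):
--     # Selection-style greedy: repeatedly extract the minimum of the remaining
--     # elements and discard everything within its reach (<= min + 2*l).
--     # No sorting (does not mutate a, unlike A which sorts it in place).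
--     rest = list(a)
--     counter = 0
--     while rest:
--         m = min(rest)
--         rest.remove(m)
--         rest = [v for v in rest if v > m + 2 * l]
--         counter += 1
--     return counter
-- ===== Notes on version B (the rewrite author's own statement) =====
-- stated objective: alternative
-- what changed: Replaced sort-then-nested-two-pointer-scan by a selection-style loop with no sorting at all: repeatedly extract min(rest), remove it, and filter out everything within min + 2*l.
import Mathlib
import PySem

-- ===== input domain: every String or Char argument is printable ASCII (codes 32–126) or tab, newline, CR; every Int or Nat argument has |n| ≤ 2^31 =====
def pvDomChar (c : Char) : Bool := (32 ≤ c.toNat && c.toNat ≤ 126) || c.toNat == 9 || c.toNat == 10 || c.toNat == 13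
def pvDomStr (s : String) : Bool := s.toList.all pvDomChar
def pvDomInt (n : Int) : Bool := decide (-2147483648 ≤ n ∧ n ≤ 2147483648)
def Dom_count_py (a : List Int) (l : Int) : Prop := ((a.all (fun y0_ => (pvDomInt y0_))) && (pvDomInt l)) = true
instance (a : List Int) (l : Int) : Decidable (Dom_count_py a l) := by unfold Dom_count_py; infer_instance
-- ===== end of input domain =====

-- B drops A's sort-then-nested-two-pointer scan for a selection-style loop (repeatedly
-- extract the minimum and filter out its reach); alternative algorithm, same return value.
-- A sorts `a` in place in Python, B does not: the equivalence is about the return value.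

-- ===== PORT A =====
-- outer while of A: take x = a[i], bump the counter; the inner while advances i past the
-- following elements ≤ x + 2*l, which on the remaining suffix is exactly dropWhile
def countGoA (l : Int) : List Int → Int → Int
  | [], c => c
  | x :: r, c => countGoA l (r.dropWhile (fun y => decide (y ≤ x + 2 * l))) (c + 1)
termination_by xs _ => xs.length
decreasing_by
  exact Nat.lt_succ_of_le (List.length_dropWhile_le _ _)

def count_py (a : List Int) (l : Int) : Int :=
  if a.length == 1 then 1
  else countGoA l (PySem.List.sorted a (fun x => x) false) 0

-- ===== PORT B =====
-- min(rest) for nonempty rest = x :: r  (running-min fold, cf. PySem.List.min?_id_cons)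
def pyMinNe (x : Int) (r : List Int) : Int := r.foldl min x

-- rest.remove(m) then [v for v in rest if v > m + 2*l]
def stepB (l m : Int) (xs : List Int) : List Int :=
  (xs.erase m).filter (fun v => decide (m + 2 * l < v))

-- needed by countB's decreasing_by: min(rest) is a member of rest
theorem pyMinNe_mem (r : List Int) : ∀ x : Int, pyMinNe x r ∈ x :: r := by
  induction r with
  | nil => intro x; simp [pyMinNe]
  | cons y t ih =>
    intro x
    have h := ih (min x y)
    show t.foldl min (min x y) ∈ x :: y :: t
    rcases List.mem_cons.mp h with h | h
    · rcases min_choice x y with hm | hm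
      · rw [pyMinNe] at h; rw [h, hm]; exact List.mem_cons_self
      · rw [pyMinNe] at h; rw [h, hm]
        exact List.mem_cons_of_mem _ List.mem_cons_self
    · exact List.mem_cons_of_mem _ (List.mem_cons_of_mem _ h)

theorem length_stepB_lt (l : Int) (x : Int) (r : List Int) :
    (stepB l (pyMinNe x r) (x :: r)).length < (x :: r).length := by
  calc (stepB l (pyMinNe x r) (x :: r)).length
      ≤ ((x :: r).erase (pyMinNe x r)).length := List.length_filter_le _ _
    _ < (x :: r).length := by
        rw [List.length_erase_of_mem (pyMinNe_mem r x)]; simp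

-- body of B's while loop: m = min(rest); rest.remove(m); rest = filter(> m+2l); counter += 1
def countB (l : Int) : List Int → Int → Int
  | [], c => c
  | x :: r, c => countB l (stepB l (pyMinNe x r) (x :: r)) (c + 1)
termination_by xs _ => xs.length
decreasing_by
  exact length_stepB_lt l x r

def count_py_alt (a : List Int) (l : Int) : Int := countB l a 0

-- ===== PRECONDITION & SPEC =====
def Spec_count_py (a : List Int) (l : Int) (out : Int) : Prop := out = count_py_alt a l
instance (a : List Int) (l : Int) (out : Int) : Decidable (Spec_count_py a l out) := by unfold Spec_count_py; infer_instance

-- ===== CLAIM (what is proved, stated in full; the proofs are below) =====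
def Claim_equal_count_py : Prop := ∀ (a : List Int) (l : Int), Dom_count_py a l → Spec_count_py a l (count_py a l)

-- ===== LEMMAS AND PROOFS =====

theorem pyMinNe_le (r : List Int) : ∀ x v : Int, v ∈ x :: r → pyMinNe x r ≤ v := by
  induction r with
  | nil => intro x v hv; simp at hv; simp [pyMinNe, hv]
  | cons y t ih =>
    intro x v hv
    have hle : t.foldl min (min x y) ≤ min x y := ih (min x y) (min x y) List.mem_cons_self
    show t.foldl min (min x y) ≤ v
    rcases List.mem_cons.mp hv with h | h
    · subst h; exact le_trans hle (min_le_left _ _)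
    · rcases List.mem_cons.mp h with h | h
      · subst h; exact le_trans hle (min_le_right _ _)
      · exact ih (min x y) v (List.mem_cons_of_mem _ h)

-- the minimum value is permutation-invariant
theorem pyMinNe_perm {s t : List Int} (x y : Int) (hp : (x :: s).Perm (y :: t)) :
    pyMinNe x s = pyMinNe y t := by
  have h1 : pyMinNe x s ∈ y :: t := hp.mem_iff.mp (pyMinNe_mem s x)
  have h2 : pyMinNe y t ∈ x :: s := hp.symm.mem_iff.mp (pyMinNe_mem t y)
  exact le_antisymm (pyMinNe_le s x _ h2) (pyMinNe_le t y _ h1)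

-- B's count is permutation-invariant (min, remove and filter all respect permutation)
theorem countB_perm (l : Int) : ∀ (n : Nat) (s t : List Int), s.length ≤ n → s.Perm t →
    ∀ c, countB l s c = countB l t c := by
  intro n
  induction n with
  | zero =>
    intro s t hs hp c
    have hse : s = [] := List.eq_nil_of_length_eq_zero (Nat.le_zero.mp hs)
    subst hse
    have hte : t = [] := hp.symm.eq_nil
    subst hte; rfl
  | succ n ih =>
    intro s t hs hp c
    cases s with
    | nil =>
      have hte : t = [] := hp.symm.eq_nil
      subst hte; rfl
    | cons x r =>
      cases t with
      | nil => exact absurd hp.eq_nil (by simp)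
      | cons y q =>
        have hm : pyMinNe x r = pyMinNe y q := pyMinNe_perm x y hp
        rw [countB, countB]
        have hperm : (stepB l (pyMinNe x r) (x :: r)).Perm (stepB l (pyMinNe y q) (y :: q)) := by
          unfold stepB; rw [hm]
          exact (hp.erase _).filter _
        refine ih _ _ ?_ hperm (c + 1)
        have h1 := length_stepB_lt l x r
        have h3 : (x :: r).length ≤ n + 1 := hs
        simp at h3; simp at h1; omega

theorem pyMinNe_of_le (r : List Int) (x : Int) (h : ∀ v ∈ r, x ≤ v) :
    pyMinNe x r = x :=
  le_antisymm (pyMinNe_le r x x List.mem_cons_self) (by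
    rcases List.mem_cons.mp (pyMinNe_mem r x) with h1 | h1
    · simp [h1]
    · exact h _ h1)

-- on a chain-sorted list, filtering the strictly-greater elements is dropWhile
theorem filter_eq_dropWhile_of_sorted (b : Int) : ∀ (r : List Int), r.Pairwise (· ≤ ·) →
    r.filter (fun v => decide (b < v)) = r.dropWhile (fun v => decide (v ≤ b)) := by
  intro r
  induction r with
  | nil => intro _; rfl
  | cons h t ih =>
    intro hp
    rcases List.pairwise_cons.mp hp with ⟨hle, hpt⟩
    by_cases hb : h ≤ b
    · have hnb : ¬ (b < h) := by omega
      simp [List.filter, List.dropWhile, hb, hnb, ih hpt]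
    · have hbh : b < h := by omega
      have hself : t.filter (fun v => decide (b < v)) = t := by
        apply List.filter_eq_self.mpr
        intro v hv
        have := hle v hv
        simp; omega
      simp [List.filter, List.dropWhile, hb, hbh, hself]

-- on a sorted list B's selection loop computes exactly A's nested scan
theorem countB_sorted (l : Int) : ∀ (n : Nat) (s : List Int), s.length ≤ n →
    s.Pairwise (· ≤ ·) → ∀ c, countB l s c = countGoA l s c := by
  intro n
  induction n with
  | zero =>
    intro s hs _ c
    have hse : s = [] := List.eq_nil_of_length_eq_zero (Nat.le_zero.mp hs)
    subst hse; rw [countB, countGoA]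
  | succ n ih =>
    intro s hs hp c
    cases s with
    | nil => rw [countB, countGoA]
    | cons x r =>
      rcases List.pairwise_cons.mp hp with ⟨hle, hpr⟩
      have hmin : pyMinNe x r = x := pyMinNe_of_le r x hle
      rw [countB, countGoA]
      have hstep : stepB l (pyMinNe x r) (x :: r)
          = r.dropWhile (fun v => decide (v ≤ x + 2 * l)) := by
        unfold stepB
        rw [hmin, List.erase_cons_head,
          filter_eq_dropWhile_of_sorted (x + 2 * l) r hpr]
      rw [hstep]
      have hsub : (r.dropWhile (fun v => decide (v ≤ x + 2 * l))).Sublist r :=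
        List.dropWhile_sublist _
      have hlen : (r.dropWhile (fun v => decide (v ≤ x + 2 * l))).length ≤ n := by
        have := hsub.length_le
        have h3 : (x :: r).length ≤ n + 1 := hs
        simp at h3; omega
      exact ih _ hlen (hpr.sublist hsub) (c + 1)

-- ===== VERDICT (by name: the statement is the Claim_ definition above) =====
theorem count_py_spec : Claim_equal_count_py := by
  intro a l _
  show count_py a l = count_py_alt a l
  unfold count_py count_py_alt
  have hperm : a.Perm (PySem.List.sorted a (fun x => x) false) :=
    (PySem.List.sorted_perm a _ false).symm
  have hsorted : (PySem.List.sorted a (fun x => x) false).Pairwise (· ≤ ·) := by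
    have := PySem.List.sorted_pairwise a (fun x => x)
    simpa using this
  have hmain : countB l a 0 = countGoA l (PySem.List.sorted a (fun x => x) false) 0 := by
    rw [countB_perm l a.length a _ le_rfl hperm 0]
    exact countB_sorted l (PySem.List.sorted a (fun x => x) false).length _ le_rfl hsorted 0
  by_cases h1 : a.length = 1
  · simp only [h1, beq_self_eq_true, if_true]
    obtain ⟨v, hv⟩ := List.length_eq_one_iff.mp h1
    subst hv
    simp [countB, stepB, pyMinNe]
  · simp only [beq_iff_eq, h1, if_false]
    exact hmain.symm
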